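-- pv_equiv track=rewrite | github.com/TOMATOsJr/Text2Table | Post mid sub files _ rough/kg_to_table.py | sort_attributes
-- ===== SOURCE A (Python) =====
-- ATTRIBUTE_ORDER: list[str] = [
--     "name", "fullname", "birth_name",
--     "birth_date", "birth_place",
--     "death_date", "death_place", "death_cause",
--     "nationality", "gender", "religion",
--     "occupation", "position", "office",
--     "alma_mater", "education",
--     "sport", "clubs", "team",
--     "party", "member_of",
--     "spouse", "children", "parents", "relations",
--     "awards", "known_for", "notable_work",
--     "genre", "instrument", "label", "associated_acts",
--     "residence", "country", "location",
--     "year",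
-- ]
--
-- def sort_attributes(
--     attributes: dict[str, list[str]],
-- ) -> list[tuple[str, list[str]]]:
--     """Sort attribute keys into canonical display order.
--
--     Attributes in ATTRIBUTE_ORDER appear first (in that order).  Remaining
--     attributes are appended alphabetically.  This guarantees that every table
--     starts with name → birth → death → personal → career → other.
--     """
--     ordered: list[tuple[str, list[str]]] = []
--     remaining = set(attributes.keys())
--
--     for attr in ATTRIBUTE_ORDER:
--         if attr in attributes:
--             ordered.append((attr, attributes[attr]))
--             remaining.discard(attr)
--
--     for attr in sorted(remaining):
--         ordered.append((attr, attributes[attr]))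
--
--     return ordered
-- ===== SOURCE B (Python) =====
-- ATTRIBUTE_ORDER: list[str] = [
--     "name", "fullname", "birth_name",
--     "birth_date", "birth_place",
--     "death_date", "death_place", "death_cause",
--     "nationality", "gender", "religion",
--     "occupation", "position", "office",
--     "alma_mater", "education",
--     "sport", "clubs", "team",
--     "party", "member_of",
--     "spouse", "children", "parents", "relations",
--     "awards", "known_for", "notable_work",
--     "genre", "instrument", "label", "associated_acts",
--     "residence", "country", "location",
--     "year",
-- ]
--
-- _ORDER_INDEX: dict[str, int] = {attr: i for i, attr in enumerate(ATTRIBUTE_ORDER)}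
-- _N: int = len(ATTRIBUTE_ORDER)
--
--
-- def _rank(a: str) -> tuple[int, str]:
--     return (_ORDER_INDEX[a], "") if a in _ORDER_INDEX else (_N, a)
--
--
-- def sort_attributes(
--     attributes: dict[str, list[str]],
-- ) -> list[tuple[str, list[str]]]:
--     """Single keyed sort: canonical attributes by their precomputed rank, the
--     rest after them alphabetically."""
--     return [(a, attributes[a]) for a in sorted(attributes, key=_rank)]
-- ===== Notes on version B (the rewrite author's own statement) =====
-- stated objective: simpler
-- what changed: Replaces A's two-phase construction (a scan of the fixed canonical list with a mutated remaining-set, then a second sort-and-append loop) by one keyed sort over the dict's keys using a precomputed rank table, followed by a single lookup comprehension.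
import Mathlib
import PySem

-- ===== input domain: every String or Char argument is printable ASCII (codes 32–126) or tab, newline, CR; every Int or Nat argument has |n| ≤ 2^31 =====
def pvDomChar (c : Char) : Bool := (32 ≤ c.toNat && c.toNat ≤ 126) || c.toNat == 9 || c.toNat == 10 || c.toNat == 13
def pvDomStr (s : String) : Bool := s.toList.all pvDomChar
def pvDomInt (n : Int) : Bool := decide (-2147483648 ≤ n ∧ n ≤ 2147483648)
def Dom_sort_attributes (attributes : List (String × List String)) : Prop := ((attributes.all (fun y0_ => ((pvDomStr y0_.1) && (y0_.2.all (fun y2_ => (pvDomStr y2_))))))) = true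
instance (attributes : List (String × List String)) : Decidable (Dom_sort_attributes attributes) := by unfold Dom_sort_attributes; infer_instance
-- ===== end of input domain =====

-- B replaces A's two-phase build (canonical-list scan with a remaining-set, then sort-and-append)
-- by one keyed sort over the dict's keys with a precomputed rank table (objective: simpler).


-- ===== PORT A =====
def ATTRIBUTE_ORDER : List String := [
    "name", "fullname", "birth_name",
    "birth_date", "birth_place",
    "death_date", "death_place", "death_cause",
    "nationality", "gender", "religion",
    "occupation", "position", "office",
    "alma_mater", "education",
    "sport", "clubs", "team",
    "party", "member_of",
    "spouse", "children", "parents", "relations",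
    "awards", "known_for", "notable_work",
    "genre", "instrument", "label", "associated_acts",
    "residence", "country", "location",
    "year"]

-- 'attributes[attr]' is ported as Dict.getD; exact here because every access is guarded
-- ('attr in attributes' resp. attr ∈ remaining ⊆ keys), so no KeyError is reachable.
def sort_attributes (attributes : List (String × List String)) : List (String × List String) :=
  let d : PySem.Dict String (List String) := PySem.Dict.mk attributes
  let st := ATTRIBUTE_ORDER.foldl
    (fun (st : List (String × List String) × PySem.Set String) attr =>
      if d.contains attr then
        (st.1 ++ [(attr, d.getD attr [])], PySem.Set.discard st.2 attr)
      else st)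
    ([], PySem.Set.ofList d.keys)
  (PySem.List.sorted st.2 (fun x => x)).foldl
    (fun acc attr => acc ++ [(attr, d.getD attr [])]) st.1

-- ===== PORT B =====
-- _ORDER_INDEX = {attr: i for i, attr in enumerate(ATTRIBUTE_ORDER)}
def pvOrderIndex : PySem.Dict String Int :=
  (PySem.List.enumerate ATTRIBUTE_ORDER).foldl (fun o p => o.insert p.2 p.1) PySem.Dict.empty

def pvN : Int := (ATTRIBUTE_ORDER.length : Int)

-- _rank(a) = (_ORDER_INDEX[a], "") if a in _ORDER_INDEX else (_N, a); the two tuple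
-- components are passed to sorted2 separately (Python tuple comparison = lexicographic).
def pvK1 (a : String) : Int := if pvOrderIndex.contains a then pvOrderIndex.getD a 0 else pvN
def pvK2 (a : String) : String := if pvOrderIndex.contains a then "" else a

def sort_attributes_alt (attributes : List (String × List String)) : List (String × List String) :=
  let d : PySem.Dict String (List String) := PySem.Dict.mk attributes
  (PySem.List.sorted2 d.keys pvK1 pvK2).map (fun a => (a, d.getD a []))

-- ===== PRECONDITION & SPEC =====
-- Pre_ excludes association lists with duplicate keys: they do not represent a Python dict
-- (A's parameter is a dict, which cannot hold duplicate keys).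
def Pre_sort_attributes (attributes : List (String × List String)) : Prop :=
  (attributes.map Prod.fst).Nodup
instance (attributes : List (String × List String)) : Decidable (Pre_sort_attributes attributes) := by unfold Pre_sort_attributes; infer_instance

def pvWitness_sort_attributes : (List (String × List String)) :=
  [("zeta", ["z"]), ("name", ["Ada"]), ("birth_date", []), ("alpha", ["a", "b"])]

def Spec_sort_attributes (attributes : List (String × List String)) (out : List (String × List String)) : Prop := out = sort_attributes_alt attributes
instance (attributes : List (String × List String)) (out : List (String × List String)) : Decidable (Spec_sort_attributes attributes out) := by unfold Spec_sort_attributes; infer_instance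

-- ===== CLAIM (what is proved, stated in full; the proofs are below) =====
def Claim_equal_sort_attributes : Prop := ∀ (attributes : List (String × List String)), Dom_sort_attributes attributes → Pre_sort_attributes attributes → Spec_sort_attributes attributes (sort_attributes attributes)

-- ===== LEMMAS AND PROOFS =====

-- sorted2 with an Int-then-String key pair is the sort by the lexicographic pair key.
theorem sorted2_eq_sorted_toLex (xs : List String) (k1 : String → Int) (k2 : String → String) :
    PySem.List.sorted2 xs k1 k2 =
      PySem.List.sorted xs (fun x => (toLex (k1 x, k2 x) : Lex (Int × String))) := by
  rw [PySem.List.sorted_eq_foldl_insertBy]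
  unfold PySem.List.sorted2
  simp only [if_neg (by simp : ¬ (false = true))]
  have hf : (fun a b : String =>
        decide ((toLex (k1 a, k2 a) : Lex (Int × String)) < toLex (k1 b, k2 b)))
      = (fun a b : String =>
        decide (k1 a < k1 b) || (!decide (k1 b < k1 a) && decide (k2 a < k2 b))) := by
    funext a b
    rcases lt_trichotomy (k1 a) (k1 b) with h | h | h
    · simp [Prod.Lex.lt_iff, h, not_lt.mpr h.le]
    · simp [Prod.Lex.lt_iff, h]
    · simp [Prod.Lex.lt_iff, not_lt.mpr h.le, (ne_of_gt h : k1 a ≠ k1 b), h]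
  rw [← hf]

-- A's first loop: appends the caught canonical attributes and filters them out of the set.
theorem loopA_eq (d : PySem.Dict String (List String)) (L : List String)
    (acc : List (String × List String)) (s : List String) :
    L.foldl (fun st attr => if d.contains attr then
        (st.1 ++ [(attr, d.getD attr [])], PySem.Set.discard st.2 attr) else st) (acc, s)
    = (acc ++ (L.filter (fun a => d.contains a)).map (fun a => (a, d.getD a [])),
       s.filter (fun x => !(L.contains x && d.contains x))) := by
  induction L generalizing acc s with
  | nil => simp
  | cons a L ih =>
    by_cases hc : d.contains a = true
    · simp only [List.foldl_cons, if_pos hc]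
      rw [ih]
      refine Prod.ext ?_ ?_
      · simp [hc]
      · show List.filter _ (PySem.Set.discard s a) = _
        unfold PySem.Set.discard
        rw [List.filter_filter]
        apply List.filter_congr
        intro x _
        by_cases hxa : x = a
        · subst hxa; simp [hc]
        · simp [hxa]
    · simp only [List.foldl_cons, if_neg hc]
      rw [ih]
      refine Prod.ext ?_ ?_
      · simp [Bool.eq_false_iff.mpr hc]
      · apply List.filter_congr
        intro x _
        by_cases hxa : x = a
        · subst hxa; simp [Bool.eq_false_iff.mpr hc]
        · simp [hxa]

theorem hAOnodup : ATTRIBUTE_ORDER.Nodup := by decide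

theorem horder_contains (a : String) :
    pvOrderIndex.contains a = decide (a ∈ ATTRIBUTE_ORDER) := by
  rw [PySem.Dict.contains_eq_decide_mem_keys]
  have h : pvOrderIndex.keys = ATTRIBUTE_ORDER := by
    unfold pvOrderIndex
    rw [PySem.Dict.keys_foldl_insert_key]
    simp [pysem]
    exact PySem.Set.ofList_eq_self_of_nodup ATTRIBUTE_ORDER hAOnodup
  rw [h]

set_option maxRecDepth 8192 in
theorem hK1_canon : ATTRIBUTE_ORDER.map pvK1 =
    [0,1,2,3,4,5,6,7,8,9,10,11,12,13,14,15,16,17,18,19,20,21,22,23,24,25,26,27,28,29,30,31,32,33,34,35] := by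
  decide

set_option maxRecDepth 16384 in
theorem hK1_lt_pvN {a : String} (ha : a ∈ ATTRIBUTE_ORDER) : pvK1 a < pvN := by
  have hmem : pvK1 a ∈ ATTRIBUTE_ORDER.map pvK1 := List.mem_map_of_mem ha
  rw [hK1_canon] at hmem
  have hall : ∀ x ∈ ([0,1,2,3,4,5,6,7,8,9,10,11,12,13,14,15,16,17,18,19,20,21,22,23,24,25,26,27,28,29,30,31,32,33,34,35] : List Int), x < pvN := by decide
  exact hall _ hmem

theorem hK1_notmem {a : String} (ha : a ∉ ATTRIBUTE_ORDER) : pvK1 a = pvN := by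
  simp [pvK1, horder_contains, ha]

theorem hK2_notmem {a : String} (ha : a ∉ ATTRIBUTE_ORDER) : pvK2 a = a := by
  simp [pvK2, horder_contains, ha]

-- canonical attributes are strictly increasing under the composite key
set_option maxRecDepth 16384 in
theorem hAOpairwise : ATTRIBUTE_ORDER.Pairwise
    (fun a b : String => (toLex (pvK1 a, pvK2 a) : Lex (Int × String)) < toLex (pvK1 b, pvK2 b)) := by
  have h1 : (ATTRIBUTE_ORDER.map pvK1).Pairwise (fun x y : Int => x < y) := by
    rw [hK1_canon]; decide
  have h2 := (List.pairwise_map).mp h1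
  exact h2.imp (fun h => Prod.Lex.lt_iff.mpr (Or.inl h))

-- the keys-level fact: the single lex sort is canonical-hits ++ alphabetical rest
set_option maxRecDepth 16384 in
theorem keys_sorted_split (d : PySem.Dict String (List String)) (hk : d.keys.Nodup) :
    PySem.List.sorted d.keys (fun x => (toLex (pvK1 x, pvK2 x) : Lex (Int × String)))
    = ATTRIBUTE_ORDER.filter (fun a => d.contains a)
      ++ PySem.List.sorted (d.keys.filter (fun x => !ATTRIBUTE_ORDER.contains x)) (fun x => x) := by
  have hR_nodup : (d.keys.filter (fun x => !ATTRIBUTE_ORDER.contains x)).Nodup := hk.filter _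
  have hcont : ∀ x ∈ d.keys, d.contains x = true := by
    intro x hx
    rw [PySem.Dict.contains_eq_decide_mem_keys]
    simpa using hx
  apply PySem.List.sorted_eq_of_perm_of_pairwise_lt
  · -- permutation
    have h2 : (ATTRIBUTE_ORDER.filter (fun a => d.contains a)).Perm
        (d.keys.filter (fun x => ATTRIBUTE_ORDER.contains x)) := by
      rw [List.perm_ext_iff_of_nodup (hAOnodup.filter _) (hk.filter _)]
      intro x
      simp only [List.mem_filter, PySem.Dict.contains_eq_decide_mem_keys,
        List.contains_iff_mem, decide_eq_true_eq]
      tauto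
    exact ((h2.append (PySem.List.sorted_perm _ _ _)).trans
      (List.filter_append_perm _ d.keys))
  · -- pairwise strictly increasing under the composite key
    rw [List.pairwise_append]
    refine ⟨hAOpairwise.filter _, ?_, ?_⟩
    · -- the alphabetical tail
      have hpw : (PySem.List.sorted (d.keys.filter (fun x => !ATTRIBUTE_ORDER.contains x))
          (fun x => x)).Pairwise (fun a b : String => a < b) := by
        have h := PySem.List.sorted_ofList_pairwise_lt
          (d.keys.filter (fun x => !ATTRIBUTE_ORDER.contains x))
        rwa [PySem.Set.ofList_eq_self_of_nodup _ hR_nodup] at h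
      refine hpw.imp_of_mem ?_
      intro a b ha hb hab
      rw [PySem.List.mem_sorted] at ha hb
      have ha' : a ∉ ATTRIBUTE_ORDER := by
        have := (List.mem_filter.mp ha).2; simpa using this
      have hb' : b ∉ ATTRIBUTE_ORDER := by
        have := (List.mem_filter.mp hb).2; simpa using this
      refine Prod.Lex.lt_iff.mpr (Or.inr ?_)
      constructor
      · show pvK1 a = pvK1 b
        rw [hK1_notmem ha', hK1_notmem hb']
      · show pvK2 a < pvK2 b
        rw [hK2_notmem ha', hK2_notmem hb']
        exact hab
    · -- canonical block comes before the alphabetical tail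
      intro a ha b hb
      have ha' : a ∈ ATTRIBUTE_ORDER := (List.mem_filter.mp ha).1
      rw [PySem.List.mem_sorted] at hb
      have hb' : b ∉ ATTRIBUTE_ORDER := by
        have := (List.mem_filter.mp hb).2; simpa using this
      refine Prod.Lex.lt_iff.mpr (Or.inl ?_)
      show pvK1 a < pvK1 b
      rw [hK1_notmem hb']
      exact hK1_lt_pvN ha'

set_option maxRecDepth 16384 in
theorem main_eq (attributes : List (String × List String))
    (hPre : (attributes.map Prod.fst).Nodup) :
    sort_attributes attributes = sort_attributes_alt attributes := by
  have hkeys : (PySem.Dict.mk attributes : PySem.Dict String (List String)).keys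
      = attributes.map Prod.fst := by simp [pysem, PySem.Dict.keys]
  have hk : (PySem.Dict.mk attributes : PySem.Dict String (List String)).keys.Nodup := by
    rw [hkeys]; exact hPre
  show (PySem.List.sorted _ (fun x => x)).foldl _ _ = _
  rw [loopA_eq]
  rw [PySem.Set.ofList_eq_self_of_nodup _ hk]
  have hrem : (PySem.Dict.mk attributes : PySem.Dict String (List String)).keys.filter
        (fun x => !(ATTRIBUTE_ORDER.contains x
          && (PySem.Dict.mk attributes : PySem.Dict String (List String)).contains x))
      = (PySem.Dict.mk attributes : PySem.Dict String (List String)).keys.filter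
        (fun x => !ATTRIBUTE_ORDER.contains x) := by
    apply List.filter_congr
    intro x hx
    have : (PySem.Dict.mk attributes : PySem.Dict String (List String)).contains x = true := by
      rw [PySem.Dict.contains_eq_decide_mem_keys]; simpa using hx
    rw [this]
    simp
  rw [hrem, PySem.List.foldl_append_singleton_eq_map]
  show _ = (PySem.List.sorted2 _ pvK1 pvK2).map _
  rw [sorted2_eq_sorted_toLex, keys_sorted_split _ hk, List.map_append]
  simp

-- ===== VERDICT (by name: the statement is the Claim_ definition above) =====
theorem sort_attributes_spec : Claim_equal_sort_attributes := by
  intro attributes _hDom hPre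
  exact main_eq attributes hPre
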